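-- pv_equiv track=rewrite | github.com/kazuki-tau/redable-code | part1/sample_code.py | get_pair_with_half_sum
-- ===== SOURCE A (Python) =====
-- from typing import Dict, List, Optional, Tuple
--
-- def get_pair_with_half_sum(num_lst: List[int]) -> Optional[Tuple[int, int]]:
--     """
--     Find a pair of numbers in a list that sum to half of the total sum of the list.
--
--     Args:
--         List[int]: A list of integers.
--
--     Returns:
--         Optional[Tuple[int, int]]: A tuple of two integers that sum to half of the total sum of the list.
--     """
--     total_sum = sum(num_lst)
--     if total_sum % 2 != 0:
--         return
--     half_sum = total_sum // 2
--     # half_sum, remainder = divmod(total_sum, 2) alternaeive way to calculate half_sum and remainder. This is more efficient.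
--     num_set = set()
--     for num in num_lst:
--         search_num = half_sum - num
--         if search_num in num_set:
--             return num, search_num
--         num_set.add(num)
-- ===== SOURCE B (Python) =====
-- from typing import Dict, List, Optional, Tuple
--
-- def get_pair_with_half_sum(num_lst: List[int]) -> Optional[Tuple[int, int]]:
--     total_sum = sum(num_lst)
--     if total_sum % 2 != 0:
--         return None
--     half_sum = total_sum // 2
--     for j in range(len(num_lst)):
--         for i in range(j):
--             if num_lst[i] + num_lst[j] == half_sum:
--                 return num_lst[j], num_lst[i]
--     return None
-- ===== Notes on version B (the rewrite author's own statement) =====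
-- stated objective: simpler
-- what changed: Replaces the auxiliary hash set and running membership test with a plain nested index scan: for each position j, scan the earlier positions i < j for a pair summing to half_sum, returning (num_lst[j], num_lst[i]).
import Mathlib
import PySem

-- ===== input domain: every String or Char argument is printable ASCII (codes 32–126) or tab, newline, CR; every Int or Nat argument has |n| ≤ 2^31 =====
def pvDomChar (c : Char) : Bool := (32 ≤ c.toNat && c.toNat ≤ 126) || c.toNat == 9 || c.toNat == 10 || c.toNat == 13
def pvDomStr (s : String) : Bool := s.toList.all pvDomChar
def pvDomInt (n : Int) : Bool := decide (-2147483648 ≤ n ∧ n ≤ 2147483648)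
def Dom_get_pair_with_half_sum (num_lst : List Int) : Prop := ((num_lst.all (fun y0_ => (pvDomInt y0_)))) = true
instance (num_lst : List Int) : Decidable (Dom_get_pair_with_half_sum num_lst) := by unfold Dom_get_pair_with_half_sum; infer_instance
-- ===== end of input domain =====

-- B replaces A's auxiliary hash set and membership test by a plain nested index scan (simpler, no extra structure); return value is identical.

-- ===== PORT A =====
-- loop 'for num in num_lst' with the seen-set accumulator
def pvLoopA (half_sum : Int) : List Int → PySem.Set Int → Option (Int × Int)
  | [], _ => none
  | num :: rest, num_set =>
    let search_num := half_sum - num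
    if PySem.Set.contains num_set search_num then some (num, search_num)
    else pvLoopA half_sum rest (PySem.Set.add num_set num)

def get_pair_with_half_sum (num_lst : List Int) : Option (Int × Int) :=
  let total_sum := num_lst.foldl (· + ·) 0
  if PySem.Int.mod total_sum 2 ≠ 0 then none
  else pvLoopA (PySem.Int.floordiv total_sum 2) num_lst PySem.Set.empty

-- ===== PORT B =====
-- inner loop 'for i in range(j)'
def pvInnerB (num_lst : List Int) (half_sum : Int) (j : Nat) : List Nat → Option (Int × Int)
  | [] => none
  | i :: is =>
    if PySem.List.pyGetD num_lst (i : Int) 0 + PySem.List.pyGetD num_lst (j : Int) 0 = half_sum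
    then some (PySem.List.pyGetD num_lst (j : Int) 0, PySem.List.pyGetD num_lst (i : Int) 0)
    else pvInnerB num_lst half_sum j is

-- outer loop 'for j in range(len(num_lst))'
def pvOuterB (num_lst : List Int) (half_sum : Int) : List Nat → Option (Int × Int)
  | [] => none
  | j :: js =>
    match pvInnerB num_lst half_sum j (List.range j) with
    | some p => some p
    | none => pvOuterB num_lst half_sum js

def get_pair_with_half_sum_alt (num_lst : List Int) : Option (Int × Int) :=
  let total_sum := num_lst.foldl (· + ·) 0
  if PySem.Int.mod total_sum 2 ≠ 0 then none
  else pvOuterB num_lst (PySem.Int.floordiv total_sum 2) (List.range num_lst.length)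

-- ===== PRECONDITION & SPEC =====
def Spec_get_pair_with_half_sum (num_lst : List Int) (out : Option (Int × Int)) : Prop := out = get_pair_with_half_sum_alt num_lst
instance (num_lst : List Int) (out : Option (Int × Int)) : Decidable (Spec_get_pair_with_half_sum num_lst out) := by unfold Spec_get_pair_with_half_sum; infer_instance

-- ===== CLAIM (what is proved, stated in full; the proofs are below) =====
def Claim_equal_get_pair_with_half_sum : Prop := ∀ (num_lst : List Int), Dom_get_pair_with_half_sum num_lst → Spec_get_pair_with_half_sum num_lst (get_pair_with_half_sum num_lst)

-- ===== LEMMAS AND PROOFS =====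

-- B's inner scan over a list of indices, characterised
theorem pvInnerB_eq (xs : List Int) (h : Int) (j : Nat) (l : List Nat) :
    pvInnerB xs h j l =
      if ∃ i ∈ l, xs.getD i 0 = h - xs.getD j 0
      then some (xs.getD j 0, h - xs.getD j 0) else none := by
  induction l with
  | nil => simp [pvInnerB]
  | cons i is ih =>
    simp only [pvInnerB, PySem.List.pyGetD_natCast]
    by_cases hc : xs.getD i 0 + xs.getD j 0 = h
    · have hv : xs.getD i 0 = h - xs.getD j 0 := by omega
      rw [if_pos hc, if_pos ⟨i, List.mem_cons_self, hv⟩, hv]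
    · have hv : ¬ (xs.getD i 0 = h - xs.getD j 0) := by omega
      rw [if_neg hc, ih]
      by_cases he : ∃ a ∈ is, xs.getD a 0 = h - xs.getD j 0
      · rcases he with ⟨a, ha, hva⟩
        rw [if_pos ⟨a, ha, hva⟩, if_pos ⟨a, List.mem_cons_of_mem _ ha, hva⟩]
      · rw [if_neg he, if_neg]
        rintro ⟨a, ha, hva⟩
        rcases List.mem_cons.mp ha with rfl | ha'
        · exact hv hva
        · exact he ⟨a, ha', hva⟩

theorem pv_mem_take_iff (xs : List Int) (k : Nat) (hk : k ≤ xs.length) (x : Int) :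
    x ∈ xs.take k ↔ ∃ i ∈ List.range k, xs.getD i 0 = x := by
  constructor
  · intro hx
    rcases List.getElem_of_mem hx with ⟨i, hi, hget⟩
    have hlen : i < k ∧ i < xs.length := by
      simp only [List.length_take] at hi; omega
    refine ⟨i, List.mem_range.mpr hlen.1, ?_⟩
    rw [List.getD_eq_getElem xs 0 hlen.2, ← hget, List.getElem_take]
  · rintro ⟨i, hi, hget⟩
    have hik : i < k := List.mem_range.mp hi
    have hil : i < xs.length := lt_of_lt_of_le hik hk
    rw [List.getD_eq_getElem xs 0 hil] at hget
    have hlt : i < (xs.take k).length := by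
      simp only [List.length_take]; omega
    have : (xs.take k)[i]'hlt = x := by
      rw [List.getElem_take]; exact hget
    exact this ▸ List.getElem_mem hlt

theorem pv_main (xs : List Int) (h : Int) :
    ∀ n k, k ≤ xs.length → n = xs.length - k →
      pvLoopA h (xs.drop k) (PySem.Set.ofList (xs.take k)) =
        pvOuterB xs h (List.range' k n) := by
  intro n
  induction n with
  | zero =>
    intro k hk hn
    have : k = xs.length := by omega
    subst this
    simp [pvLoopA, pvOuterB, List.drop_eq_nil_of_le (le_refl _)]
  | succ n ih =>
    intro k hk hn
    have hkl : k < xs.length := by omega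
    rw [List.drop_eq_getElem_cons hkl, List.range'_succ]
    have hgd : xs.getD k 0 = xs[k] := List.getD_eq_getElem xs 0 hkl
    show (if (PySem.Set.ofList (xs.take k)).contains (h - xs[k]) = true
          then some (xs[k], h - xs[k])
          else pvLoopA h (xs.drop (k + 1)) ((PySem.Set.ofList (xs.take k)).add xs[k]))
        = pvOuterB xs h (k :: List.range' (k + 1) n)
    by_cases hc : (h - xs[k]) ∈ xs.take k
    · have hex : ∃ i ∈ List.range k, xs.getD i 0 = h - xs.getD k 0 := by
        rw [hgd]; exact (pv_mem_take_iff xs k (le_of_lt hkl) _).mp hc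
      have hcont : (PySem.Set.ofList (xs.take k)).contains (h - xs[k]) = true := by
        rw [PySem.Set.contains_iff]; exact (PySem.Set.mem_ofList _ _).mpr hc
      rw [if_pos hcont]
      show _ = pvOuterB xs h (k :: List.range' (k + 1) n)
      unfold pvOuterB
      rw [pvInnerB_eq, if_pos hex, hgd]
    · have hex : ¬ ∃ i ∈ List.range k, xs.getD i 0 = h - xs.getD k 0 := by
        rw [hgd]; exact fun hx => hc ((pv_mem_take_iff xs k (le_of_lt hkl) _).mpr hx)
      have hcont : ¬ (PySem.Set.ofList (xs.take k)).contains (h - xs[k]) = true := by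
        rw [PySem.Set.contains_iff]
        exact fun hx => hc ((PySem.Set.mem_ofList _ _).mp hx)
      rw [if_neg hcont]
      have htake : (PySem.Set.ofList (xs.take k)).add xs[k]
          = PySem.Set.ofList (xs.take (k + 1)) := by
        rw [List.take_add_one, List.getElem?_eq_getElem hkl]
        simp only [Option.toList_some, PySem.Set.ofList_append_singleton]
      rw [htake]
      unfold pvOuterB
      rw [pvInnerB_eq, if_neg hex]
      exact ih (k + 1) (by omega) (by omega)

-- ===== VERDICT (by name: the statement is the Claim_ definition above) =====
theorem get_pair_with_half_sum_spec : Claim_equal_get_pair_with_half_sum := by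
  intro num_lst _
  unfold Spec_get_pair_with_half_sum get_pair_with_half_sum get_pair_with_half_sum_alt
  by_cases hm : PySem.Int.mod (num_lst.foldl (· + ·) 0) 2 ≠ 0
  · rw [if_pos hm, if_pos hm]
  · rw [if_neg hm, if_neg hm]
    have := pv_main num_lst (PySem.Int.floordiv (num_lst.foldl (· + ·) 0) 2)
      num_lst.length 0 (by omega) (by omega)
    simpa [List.range_eq_range', PySem.Set.empty] using this
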